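-- pv_equiv track=rewrite | github.com/IntelPython/sdc | docs/source/buildscripts/sdc_doc_utils.py | get_indent
-- ===== SOURCE A (Python) =====
-- def get_indent(text):
--     """
--     Returns indentation for a given ``text``.
--
--     :param text: String, can be multi-line. Only first non-empty line is used to determine the indentation
--     :return: Indentation (the number of whitespace characters)
--     """
--     lines = text.split('\n')
--     while len(lines) > 0 and lines[0] == '':
--         lines.pop(0)
--
--     if len(lines) == 0:
--         return 0  # Text was empty, indentation for empty text is 0
--
--     n_stripped = len(lines[0].lstrip())  # Length of the string after stripping whitespaces on the left
--     return len(lines[0]) - n_stripped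
-- ===== SOURCE B (Python) =====
-- def get_indent(text):
--     stripped = text.lstrip('\n')
--     first_line = stripped.split('\n', 1)[0]
--     return len(first_line) - len(first_line.lstrip())
-- ===== Notes on version B (the rewrite author's own statement) =====
-- stated objective: simpler
-- what changed: B drops A's split-into-a-line-list and pop-leading-empty-lines while-loop, instead stripping the leading newline characters with str.lstrip and taking the first line with a maxsplit-1 split; no loop over lines remains.
import Mathlib
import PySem

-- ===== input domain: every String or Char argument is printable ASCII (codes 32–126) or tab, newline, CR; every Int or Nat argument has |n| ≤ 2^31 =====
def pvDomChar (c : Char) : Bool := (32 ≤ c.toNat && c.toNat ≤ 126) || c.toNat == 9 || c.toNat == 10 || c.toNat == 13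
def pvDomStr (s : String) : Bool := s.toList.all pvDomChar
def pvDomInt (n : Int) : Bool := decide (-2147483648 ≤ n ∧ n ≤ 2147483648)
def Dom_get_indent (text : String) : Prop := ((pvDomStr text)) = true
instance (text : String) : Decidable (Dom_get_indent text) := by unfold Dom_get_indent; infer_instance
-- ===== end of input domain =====

-- B replaces A's split-into-lines + pop-while loop by two string operations (strip leading
-- newlines, take the first line) with no loop over lines; objective: simpler.

-- ===== PORT A =====
-- the 'while len(lines) > 0 and lines[0] == "": lines.pop(0)' loop
def dropLeadingEmpty : List String → List String
  | [] => []
  | l :: ls => if l = "" then dropLeadingEmpty ls else l :: ls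

def get_indent (text : String) : Int :=
  match PySem.Str.split? text "\n" with
  | none => 0          -- unreachable: the separator "\n" is non-empty, so split never raises
  | some lines0 =>
    match dropLeadingEmpty lines0 with
    | [] => 0
    | l :: _ => PySem.Str.len l - PySem.Str.len (PySem.Str.lstrip l)

-- ===== PORT B =====
def get_indent_alt (text : String) : Int :=
  -- stripped = text.lstrip('\n'): drops exactly the leading newline characters (exact)
  let stripped := text.toList.dropWhile (· == '\n')
  -- first_line = stripped.split('\n', 1)[0]: the characters before the first '\n' (exact)
  let first_line := stripped.takeWhile (· != '\n')
  -- len(first_line) - len(first_line.lstrip())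
  (first_line.length : Int) - ((PySem.Chars.lstrip first_line).length : Int)

-- ===== PRECONDITION & SPEC =====
def Spec_get_indent (text : String) (out : Int) : Prop := out = get_indent_alt text
instance (text : String) (out : Int) : Decidable (Spec_get_indent text out) := by unfold Spec_get_indent; infer_instance

-- ===== CLAIM (what is proved, stated in full; the proofs are below) =====
def Claim_equal_get_indent : Prop := ∀ (text : String), Dom_get_indent text → Spec_get_indent text (get_indent text)

-- ===== LEMMAS AND PROOFS =====

-- pure characterisation of splitting a char list on '\n'
def nlSplit : List Char → List (List Char)
  | [] => [[]]
  | c :: rest => if c = '\n' then [] :: nlSplit rest else (nlSplit rest).modifyHead (c :: ·)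

theorem nlSplit_ne_nil (cs : List Char) : nlSplit cs ≠ [] := by
  cases cs with
  | nil => simp [nlSplit]
  | cons c rest =>
    simp only [nlSplit]
    split_ifs
    · simp
    · cases h : nlSplit rest with
      | nil => exact absurd h (nlSplit_ne_nil rest)
      | cons a t => simp

theorem go_invariant (fuel : Nat) (l cur : List Char) (acc : List (List Char))
    (h : l.length ≤ fuel) :
    PySem.Chars.splitOn.go ['\n'] fuel l cur acc
      = acc.reverse ++ (nlSplit l).modifyHead (cur.reverse ++ ·) := by
  induction fuel generalizing l cur acc with
  | zero =>
    have : l = [] := by cases l <;> simp_all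
    subst this
    simp [PySem.Chars.splitOn.go, nlSplit]
  | succ f ih =>
    cases l with
    | nil => simp [PySem.Chars.splitOn.go, nlSplit]
    | cons c rest =>
      show (if ['\n'].isPrefixOf (c :: rest) = true then
              PySem.Chars.splitOn.go ['\n'] f (List.drop ['\n'].length (c :: rest)) [] (cur.reverse :: acc)
            else PySem.Chars.splitOn.go ['\n'] f rest (c :: cur) acc) = _
      by_cases hc : c = '\n'
      · subst hc
        rw [if_pos (by simp [List.isPrefixOf])]
        rw [ih _ _ _ (by simpa using h)]
        cases hs : nlSplit rest with
        | nil => exact absurd hs (nlSplit_ne_nil rest)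
        | cons a t => simp [nlSplit, hs]
      · rw [if_neg (by simp [List.isPrefixOf]; exact fun e => hc e.symm)]
        rw [ih _ _ _ (by simpa using h)]
        cases hs : nlSplit rest with
        | nil => exact absurd hs (nlSplit_ne_nil rest)
        | cons a t => simp [nlSplit, hs, hc]

theorem splitOn_nl (cs : List Char) : PySem.Chars.splitOn cs ['\n'] = nlSplit cs := by
  unfold PySem.Chars.splitOn
  rw [go_invariant _ _ _ _ (by omega)]
  cases hs : nlSplit cs with
  | nil => exact absurd hs (nlSplit_ne_nil cs)
  | cons a t => simp

theorem nlSplit_head (cs : List Char) :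
    ∃ t, nlSplit cs = cs.takeWhile (· != '\n') :: t := by
  induction cs with
  | nil => exact ⟨[], rfl⟩
  | cons c rest ih =>
    by_cases hc : c = '\n'
    · subst hc
      exact ⟨nlSplit rest, by simp [nlSplit]⟩
    · obtain ⟨t, ht⟩ := ih
      refine ⟨t, ?_⟩
      simp [nlSplit, hc, ht]

theorem main_chars (cs : List Char) :
    (match dropLeadingEmpty ((nlSplit cs).map String.ofList) with
      | [] => (0 : Int)
      | l :: _ => PySem.Str.len l - PySem.Str.len (PySem.Str.lstrip l))
    = (((cs.dropWhile (· == '\n')).takeWhile (· != '\n')).length : Int)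
      - ((PySem.Chars.lstrip ((cs.dropWhile (· == '\n')).takeWhile (· != '\n'))).length : Int) := by
  induction cs with
  | nil => simp [nlSplit, dropLeadingEmpty, PySem.Chars.lstrip]
  | cons c rest ih =>
    by_cases hc : c = '\n'
    · subst hc
      have h1 : nlSplit ('\n' :: rest) = [] :: nlSplit rest := by simp [nlSplit]
      have h2 : String.ofList ([] : List Char) = "" := rfl
      rw [h1]
      simpa [dropLeadingEmpty, h2] using ih
    · obtain ⟨t, ht⟩ := nlSplit_head rest
      have h1 : nlSplit (c :: rest) = (c :: rest.takeWhile (· != '\n')) :: t := by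
        simp [nlSplit, hc, ht]
      have hne : String.ofList (c :: rest.takeWhile (· != '\n')) ≠ "" := by
        intro h
        have := congrArg String.toList h
        simp [String.toList_ofList] at this
      rw [h1]
      simp only [List.map_cons, dropLeadingEmpty, if_neg hne]
      have hdw : (c :: rest).dropWhile (· == '\n') = c :: rest := by
        simp [hc]
      rw [hdw]
      simp [PySem.Str.len_eq, PySem.Str.toList_lstrip, String.toList_ofList, hc]

-- ===== VERDICT (by name: the statement is the Claim_ definition above) =====
theorem get_indent_spec : Claim_equal_get_indent := by
  intro text _
  show get_indent text = get_indent_alt text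
  unfold get_indent get_indent_alt
  have hsep : ("\n" : String).toList = ['\n'] := rfl
  simp only [PySem.Str.split?, PySem.Chars.split?, hsep, List.isEmpty_cons]
  · rw [splitOn_nl]
    exact main_chars text.toList
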